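-- pv_equiv track=rewrite | github.com/Ezhil-Language-Foundation/tamilpesu_us | packages/kuralgen/kural_gen.py | realign_array
-- ===== SOURCE A (Python) =====
-- def realign_array(arr, fixed_length):
--     diff = fixed_length - len(arr)
--     if diff > 0:
--         arr += [''] * diff
--     elif diff < 0:
--         arr = arr[:fixed_length]
--
--     gap_size = fixed_length - 1
--
--     aligned = [elem for pair in zip(arr, [''] * gap_size) for elem in pair]
--     for i in range(1, len(aligned)):
--         if aligned[i] == '' or len(aligned) == 0:
--             aligned[i] = aligned[i - 1]
--     return aligned
-- ===== SOURCE B (Python) =====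
-- def realign_array(arr, fixed_length):
--     diff = fixed_length - len(arr)
--     if diff > 0:
--         arr += [''] * diff
--     if fixed_length <= 1:
--         return []
--     out = []
--     last = arr[0]
--     out.append(last)
--     out.append(last)
--     for e in arr[1:fixed_length - 1]:
--         if e != '':
--             last = e
--         out.append(last)
--         out.append(last)
--     return out
-- ===== Notes on version B (the rewrite author's own statement) =====
-- stated objective: simpler
-- what changed: Replaces A's build-interleaved-list-then-sequentially-fill-in-place (zip with a gap list, then an index loop mutating aligned[i]) by a single forward pass over the padded prefix that keeps one running 'last' value and appends it twice per element; no intermediate interleaved list and no index-based mutation.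
import Mathlib
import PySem

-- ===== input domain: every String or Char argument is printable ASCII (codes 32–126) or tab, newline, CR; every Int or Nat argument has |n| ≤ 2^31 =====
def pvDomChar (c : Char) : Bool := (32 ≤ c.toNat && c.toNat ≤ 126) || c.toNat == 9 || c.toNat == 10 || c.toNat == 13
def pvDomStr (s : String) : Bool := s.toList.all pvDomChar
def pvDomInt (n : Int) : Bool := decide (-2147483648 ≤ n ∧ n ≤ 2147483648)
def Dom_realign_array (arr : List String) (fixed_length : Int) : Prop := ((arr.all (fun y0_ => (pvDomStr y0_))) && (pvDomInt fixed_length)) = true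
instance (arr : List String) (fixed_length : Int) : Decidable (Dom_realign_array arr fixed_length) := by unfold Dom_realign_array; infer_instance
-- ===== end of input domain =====

-- B replaces A's interleave-then-sequential-fill by one forward pass with a running `last`
-- appended twice per element (B performs the same in-place pad mutation of arr as A); objective: simpler.


-- ===== PORT A =====
def realign_array (arr : List String) (fixed_length : Int) : List String :=
  let diff := fixed_length - (arr.length : Int)
  let arr := if diff > 0 then arr ++ List.replicate diff.toNat ""   -- arr += [''] * diff
             else if diff < 0 then PySem.List.slice arr none (some fixed_length)  -- arr = arr[:fixed_length]
             else arr
  let gap_size := fixed_length - 1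
  -- aligned = [elem for pair in zip(arr, [''] * gap_size) for elem in pair]
  let aligned := (arr.zip (List.replicate gap_size.toNat "")).flatMap (fun p => [p.1, p.2])
  -- for i in range(1, len(aligned)): if aligned[i] == '' or len(aligned) == 0: aligned[i] = aligned[i-1]
  (List.range' 1 (aligned.length - 1)).foldl
    (fun al i => if al.getD i "" = "" ∨ al.length = 0 then al.set i (al.getD (i - 1) "") else al)
    aligned

-- ===== PORT B =====
def realign_array_alt (arr : List String) (fixed_length : Int) : List String :=
  let diff := fixed_length - (arr.length : Int)
  let arr := if diff > 0 then arr ++ List.replicate diff.toNat "" else arr   -- arr += [''] * diff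
  if fixed_length ≤ 1 then []
  else
    let last := arr.getD 0 ""   -- arr[0]; arr is nonempty here (len ≥ fixed_length ≥ 2 after the pad)
    -- for e in arr[1:fixed_length-1]: if e != '': last = e; out.append(last); out.append(last)
    ((PySem.List.slice arr (some 1) (some (fixed_length - 1))).foldl
      (fun (s : String × List String) e =>
        let l := if e ≠ "" then e else s.1
        (l, s.2 ++ [l, l]))
      (last, [last, last])).2

-- ===== PRECONDITION & SPEC =====
def Spec_realign_array (arr : List String) (fixed_length : Int) (out : List String) : Prop := out = realign_array_alt arr fixed_length
instance (arr : List String) (fixed_length : Int) (out : List String) : Decidable (Spec_realign_array arr fixed_length out) := by unfold Spec_realign_array; infer_instance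

-- ===== CLAIM (what is proved, stated in full; the proofs are below) =====
def Claim_equal_realign_array : Prop := ∀ (arr : List String) (fixed_length : Int), Dom_realign_array arr fixed_length → Spec_realign_array arr fixed_length (realign_array arr fixed_length)

-- ===== LEMMAS AND PROOFS =====

/-- The forward-filled-and-duplicated expansion both programs compute. -/
def pvExpand (l : String) : List String → List String
  | [] => []
  | e :: es => let l' := if e ≠ "" then e else l; l' :: l' :: pvExpand l' es

/-- A's interleaving of the kept prefix with empty gap slots. -/
def pvInter (es : List String) : List String := es.flatMap (fun e => [e, ""])

/-- One iteration of A's fill loop. -/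
def pvStep (al : List String) (i : Nat) : List String :=
  if al.getD i "" = "" ∨ al.length = 0 then al.set i (al.getD (i - 1) "") else al

lemma zip_replicate_flat (xs : List String) (g : Nat) :
    (xs.zip (List.replicate g "")).flatMap (fun p => [p.1, p.2]) = pvInter (xs.take g) := by
  induction xs generalizing g with
  | nil => simp [pvInter]
  | cons x xs ih =>
    cases g with
    | zero => simp [pvInter]
    | succ g =>
      simp only [List.replicate_succ, List.zip_cons_cons, List.flatMap_cons, List.take_succ_cons]
      rw [ih g]; rfl

lemma fold_expand (es : List String) (l : String) (acc : List String) :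
    (es.foldl (fun (s : String × List String) e =>
        let l' := if e ≠ "" then e else s.1
        (l', s.2 ++ [l', l'])) (l, acc)).2 = acc ++ pvExpand l es := by
  induction es generalizing l acc with
  | nil => simp [pvExpand]
  | cons e es ih =>
    rw [List.foldl_cons]
    refine (ih (if e ≠ "" then e else l) (acc ++ [if e ≠ "" then e else l, if e ≠ "" then e else l])).trans ?_
    simp [pvExpand]

/-- Invariant of A's fill loop: with a filled, nonempty prefix `P` ending in `l` already in
place, running the loop over the remaining indices turns `P ++ pvInter es` into `P ++ pvExpand l es`. -/
lemma fill_loop (es P : List String) (l : String) (hP : 0 < P.length)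
    (hl : P.getD (P.length - 1) "" = l) :
    (List.range' P.length (2 * es.length)).foldl pvStep (P ++ pvInter es) = P ++ pvExpand l es := by
  induction es generalizing P l with
  | nil => simp [pvInter, pvExpand]
  | cons e es ih =>
    have hlen : 2 * (e :: es).length = 2 * es.length + 1 + 1 := by simp [List.length_cons]; omega
    rw [hlen, List.range'_succ, List.range'_succ, List.foldl_cons, List.foldl_cons]
    have hinter : pvInter (e :: es) = e :: "" :: pvInter es := rfl
    set l' := if e ≠ "" then e else l with hl'
    have hget : (P ++ e :: "" :: pvInter es).getD P.length "" = e := by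
      simp [List.getD]
    have hstep1 : pvStep (P ++ pvInter (e :: es)) P.length = P ++ l' :: "" :: pvInter es := by
      rw [hinter]
      unfold pvStep
      by_cases he : e = ""
      · rw [if_pos (Or.inl (by rw [hget, he]))]
        have hgetprev : (P ++ e :: "" :: pvInter es).getD (P.length - 1) "" = l := by
          rw [← hl]
          simp [List.getD, List.getElem?_append_left (by omega : P.length - 1 < P.length)]
        rw [hgetprev]
        rw [List.set_append]
        simp [he, hl']
      · rw [if_neg]
        · simp [hl', he]
        · rintro (h | h)
          · exact he (by rwa [hget] at h)
          · simp at h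
    rw [hstep1]
    have hget2 : (P ++ l' :: "" :: pvInter es).getD (P.length + 1) "" = "" := by
      simp [List.getD]
    have hstep2 : pvStep (P ++ l' :: "" :: pvInter es) (P.length + 1) = (P ++ [l', l']) ++ pvInter es := by
      unfold pvStep
      rw [if_pos (Or.inl hget2)]
      have hgetprev2 : (P ++ l' :: "" :: pvInter es).getD (P.length + 1 - 1) "" = l' := by
        simp [List.getD]
      rw [hgetprev2, List.set_append]
      simp
    rw [hstep2]
    have hl2 : (P ++ [l', l']).getD ((P ++ [l', l']).length - 1) "" = l' := by
      simp [List.getD]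
    have h3 := ih (P ++ [l', l']) l' (by simp) hl2
    rw [List.length_append] at h3
    simp only [List.length_cons, List.length_nil] at h3
    rw [show P.length + (0 + 1 + 1) = P.length + 1 + 1 from by omega] at h3
    rw [h3]
    simp [pvExpand, ← hl']

theorem realign_core (arr : List String) (fixed_length : Int) :
    realign_array arr fixed_length = realign_array_alt arr fixed_length := by
  by_cases hfl : fixed_length ≤ 1
  · -- A's aligned list is empty: gap_size ≤ 0
    have hgap : (fixed_length - 1).toNat = 0 := by omega
    simp [realign_array, realign_array_alt, hgap, hfl]
  · rw [not_le] at hfl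
    set n : Nat := fixed_length.toNat with hn
    have hfn : fixed_length = (n : Int) := by omega
    have hn2 : 2 ≤ n := by omega
    set diff : Int := fixed_length - (arr.length : Int) with hdiff
    set arr' : List String :=
      if diff > 0 then arr ++ List.replicate diff.toNat "" else arr with harr'
    have hlen' : n ≤ arr'.length := by
      rw [harr']
      by_cases hd : diff > 0
      · simp [hd]; omega
      · simp [hd]; omega
    set arrA : List String :=
      if diff > 0 then arr ++ List.replicate diff.toNat ""
      else if diff < 0 then PySem.List.slice arr none (some fixed_length)
      else arr with harrA
    have htake : arrA.take (n - 1) = arr'.take (n - 1) := by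
      rw [harrA, harr']
      by_cases hd : diff > 0
      · simp [hd]
      · by_cases hd' : diff < 0
        · have hs : PySem.List.slice arr none (some fixed_length) = arr.take n := by
            rw [PySem.List.slice_to arr (by omega), hfn]; simp
          simp only [hd, hd', if_true, if_false, hs, List.take_take]
          congr 1; omega
        · simp [hd, hd']
    have htlen : (arr'.take (n - 1)).length = n - 1 := by simp; omega
    obtain ⟨e0, rest, hes⟩ : ∃ e0 rest, arr'.take (n - 1) = e0 :: rest := by
      cases h : arr'.take (n - 1) with
      | nil => rw [h] at htlen; simp at htlen; omega
      | cons a t => exact ⟨a, t, rfl⟩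
    have hrestlen : rest.length = n - 2 := by
      rw [hes] at htlen; simp at htlen; omega
    have hgapNat : (fixed_length - 1).toNat = n - 1 := by omega
    -- A computes [e0, e0] ++ pvExpand e0 rest
    have hA : realign_array arr fixed_length = [e0, e0] ++ pvExpand e0 rest := by
      rw [realign_array]
      simp only [← hdiff, ← harrA, hgapNat, zip_replicate_flat, htake, hes]
      have hinter : pvInter (e0 :: rest) = e0 :: "" :: pvInter rest := rfl
      have hil : (pvInter (e0 :: rest)).length = 2 * rest.length + 1 + 1 := by
        simp [pvInter]; omega
      have hfun : (fun (al : List String) (i : Nat) =>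
          if al.getD i "" = "" ∨ al.length = 0 then al.set i (al.getD (i - 1) "") else al) = pvStep := rfl
      rw [hfun, hil, hinter]
      have h11 : 2 * rest.length + 1 + 1 - 1 = 2 * rest.length + 1 := by omega
      rw [h11, List.range'_succ, List.foldl_cons]
      have hfirst : pvStep (e0 :: "" :: pvInter rest) 1 = [e0, e0] ++ pvInter rest := by
        unfold pvStep
        rw [if_pos (Or.inl (by simp [List.getD]))]
        simp [List.getD]
      rw [hfirst]
      have := fill_loop rest [e0, e0] e0 (by simp) (by simp [List.getD])
      simpa using this
    -- B computes the same
    have hrest : PySem.List.slice arr' (some 1) (some (fixed_length - 1)) = rest := by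
      rw [PySem.List.slice_toNat arr' (by omega) (by omega)]
      have h2 : (fixed_length - 1).toNat = n - 1 := hgapNat
      have h1 : (1 : Int).toNat = 1 := rfl
      rw [h1, h2]
      have hd : (arr'.take (n - 1)).drop 1 = rest := by rw [hes]; simp
      rw [← hd, List.drop_take]
    have he0 : arr'.getD 0 "" = e0 := by
      have h0 : (arr'.take (n - 1)).getD 0 "" = e0 := by rw [hes]; rfl
      rw [← h0]
      have hlt : (0:Nat) < n - 1 := by omega
      simp [List.getD, hlt]
    have hB : realign_array_alt arr fixed_length = [e0, e0] ++ pvExpand e0 rest := by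
      rw [realign_array_alt]
      simp only [← hdiff, ← harr']
      rw [if_neg (by omega)]
      simp only [he0, hrest]
      exact fold_expand rest e0 [e0, e0]
    rw [hA, hB]

-- ===== VERDICT (by name: the statement is the Claim_ definition above) =====
theorem realign_array_spec : Claim_equal_realign_array := by
  intro arr fixed_length _
  unfold Spec_realign_array
  exact realign_core arr fixed_length
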